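-- pv_equiv track=rewrite | github.com/Antoine07/python | B2/Python_introduction/corrections/max.py | max_with_indice
-- ===== SOURCE A (Python) =====
-- def max_with_indice(l):
--
--     # not l <=> vérifier que la liste est vide
--     if not l:
--         raise "Votre liste est vide ..."
--
--     # le premier élément numérique de la liste est considé comme étant le plus
--     # grand de manière arbitraire.
--     pos, candidate = 0, l[0]
--
--     for i in range(1, len(l)):
--         if candidate < l[i]:
--              pos, candidate = i, l[i]
--
--     return pos, candidate
-- ===== SOURCE B (Python) =====
-- def max_with_indice(l):
--     if not l:
--         raise "Votre liste est vide ..."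
--     candidate = max(l)
--     return l.index(candidate), candidate
-- ===== Notes on version B (the rewrite author's own statement) =====
-- stated objective: idiomatic
-- what changed: Replaces the single running-candidate loop with manual index bookkeeping by two staged built-in passes: first compute the maximum with max(l), then locate its first occurrence with l.index(candidate); first-occurrence tie-breaking is preserved because list.index returns the earliest match.
import Mathlib
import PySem

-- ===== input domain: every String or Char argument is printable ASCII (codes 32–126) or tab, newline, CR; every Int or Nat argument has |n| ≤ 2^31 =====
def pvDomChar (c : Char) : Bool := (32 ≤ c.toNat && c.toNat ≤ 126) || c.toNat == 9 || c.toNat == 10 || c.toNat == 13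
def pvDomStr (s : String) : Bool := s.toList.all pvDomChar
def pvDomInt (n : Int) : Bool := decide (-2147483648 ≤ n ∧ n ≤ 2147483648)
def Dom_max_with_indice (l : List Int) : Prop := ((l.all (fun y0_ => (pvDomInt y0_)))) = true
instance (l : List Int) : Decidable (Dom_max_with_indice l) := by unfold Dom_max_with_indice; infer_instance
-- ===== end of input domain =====

-- B computes the maximum with max(l) and then its first index with l.index (two staged built-in passes) instead of A's running-candidate loop; both raise on the empty list (excluded by Pre_).


-- ===== PORT A =====
def max_with_indice (l : List Int) : Int × Int :=
  match l with
  | [] => (0, 0)   -- Python raises here (excluded by Pre_)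
  | x :: _ =>
    (PySem.List.pyRange 1 (l.length : Int) 1).foldl
      (fun (s : Int × Int) i =>
        if s.2 < PySem.List.pyGetD l i 0 then (i, PySem.List.pyGetD l i 0) else s)
      (0, x)

-- ===== PORT B =====
def max_with_indice_alt (l : List Int) : Int × Int :=
  match PySem.List.max? l (fun y => y) with
  | none => (0, 0)   -- Python raises here (excluded by Pre_)
  | some candidate =>
    match PySem.List.index? l candidate with
    | some i => ((i : Int), candidate)
    | none => (0, 0)   -- unreachable: the max is a member of l

-- ===== PRECONDITION & SPEC =====
-- A (and B) raise on the empty list; Pre_ excludes exactly that input.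
def Pre_max_with_indice (l : List Int) : Prop := l ≠ []
instance (l : List Int) : Decidable (Pre_max_with_indice l) := by unfold Pre_max_with_indice; infer_instance
def pvWitness_max_with_indice : List Int := [3, 1, 3]
def Spec_max_with_indice (l : List Int) (out : Int × Int) : Prop := out = max_with_indice_alt l
instance (l : List Int) (out : Int × Int) : Decidable (Spec_max_with_indice l out) := by unfold Spec_max_with_indice; infer_instance

-- ===== CLAIM (what is proved, stated in full; the proofs are below) =====
def Claim_equal_max_with_indice : Prop := ∀ (l : List Int), Dom_max_with_indice l → Pre_max_with_indice l → Spec_max_with_indice l (max_with_indice l)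

-- ===== LEMMAS AND PROOFS =====

-- Proof-only reference recursion: A's index loop, with the list suffix made structural.
def pvGo (j c : Int) (k : Nat) : List Int → Int × Int
  | [] => (j, c)
  | y :: ys => if c < y then pvGo (k : Int) y (k + 1) ys else pvGo j c (k + 1) ys

-- A's fold over range(k, len l) with l[i] lookups is pvGo on the suffix l.drop k.
theorem foldA_eq_pvGo (r : List Int) : ∀ (l : List Int) (k : Nat) (j c : Int),
    l.drop k = r → k ≤ l.length →
    (PySem.List.pyRange (k : Int) (l.length : Int) 1).foldl
      (fun (s : Int × Int) i =>
        if s.2 < PySem.List.pyGetD l i 0 then (i, PySem.List.pyGetD l i 0) else s)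
      (j, c) = pvGo j c k r := by
  induction r with
  | nil =>
    intro l k j c hdrop hk
    have : l.length ≤ k := by
      by_contra h
      have := List.drop_eq_nil_iff.mp hdrop
      omega
    have hkl : k = l.length := le_antisymm hk this
    rw [PySem.List.pyRange_one_eq_nil (by exact_mod_cast hkl.ge)]
    rfl
  | cons y ys ih =>
    intro l k j c hdrop hk
    have hklt : k < l.length := by
      by_contra h
      have : l.drop k = [] := List.drop_eq_nil_iff.mpr (by omega)
      simp [this] at hdrop
    have hget : PySem.List.pyGetD l (k : Int) 0 = y := by
      rw [PySem.List.pyGetD_natCast]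
      have h0 : (l.drop k)[0]? = some y := by rw [hdrop]; rfl
      rw [List.getElem?_drop] at h0
      have : l[k]? = some y := by simpa using h0
      simp [List.getD, this]
    have hdrop' : l.drop (k + 1) = ys := by
      have : l.drop (k + 1) = (l.drop k).drop 1 := by
        rw [List.drop_drop]
      simp [this, hdrop]
    rw [PySem.List.pyRange_one_cons (by exact_mod_cast hklt)]
    simp only [List.foldl_cons, hget]
    have hcast : ((k : Int) + 1) = ((k + 1 : Nat) : Int) := by push_cast; ring
    by_cases hcy : c < y
    · simp only [if_pos hcy, hcast, pvGo, ih l (k + 1) (k : Int) y hdrop' (by omega)]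
    · simp only [if_neg hcy, hcast, pvGo, ih l (k + 1) j c hdrop' (by omega)]

-- pvGo returns the seed if nothing beats it, else (offset + first index of the max, the max).
theorem pvGo_spec (t : List Int) : ∀ (j c : Int) (k : Nat),
    pvGo j c k t =
      if ∀ y ∈ t, y ≤ c then (j, c)
      else ((k : Int) + (((PySem.List.index? t (t.foldl max c)).getD 0 : Nat) : Int), t.foldl max c) := by
  induction t with
  | nil => intro j c k; simp [pvGo]
  | cons y ys ih =>
    intro j c k
    by_cases hcy : c < y
    · have hM : (y :: ys).foldl max c = ys.foldl max y := by
        simp [List.foldl_cons, max_eq_right hcy.le]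
      have hnot : ¬ ∀ z ∈ y :: ys, z ≤ c := by
        intro h; exact absurd (h y (by simp)) (not_le.mpr hcy)
      rw [pvGo, if_pos hcy, ih ((k : Int)) y (k + 1), if_neg hnot, hM]
      by_cases hall : ∀ z ∈ ys, z ≤ y
      · have hMy : ys.foldl max y = y := by
          rcases PySem.List.foldl_max_mem ys y with h | h
          · exact h
          · exact le_antisymm (hall _ h) (PySem.List.le_foldl_max ys y).1
        rw [if_pos hall, hMy, PySem.List.index?_cons_self]
        simp
      · have hyM : y < ys.foldl max y := by
          push Not at hall
          obtain ⟨z, hz, hzy⟩ := hall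
          exact lt_of_lt_of_le hzy ((PySem.List.le_foldl_max ys y).2 z hz)
        have hne : y ≠ ys.foldl max y := ne_of_lt hyM
        have hmem : ys.foldl max y ∈ ys := by
          rcases PySem.List.foldl_max_mem ys y with h | h
          · exact absurd h hne.symm
          · exact h
        rw [if_neg hall, PySem.List.index?_cons_of_ne _ hne]
        obtain ⟨i, hi⟩ := Option.isSome_iff_exists.mp
          ((PySem.List.index?_isSome_iff ys _).mpr hmem)
        rw [hi]
        simp only [Option.map_some, Option.getD_some, Prod.mk.injEq]
        refine ⟨by push_cast; ring, trivial⟩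
    · have hyc : y ≤ c := not_lt.mp hcy
      have hM : (y :: ys).foldl max c = ys.foldl max c := by
        simp [List.foldl_cons, max_eq_left hyc]
      rw [pvGo, if_neg hcy, ih j c (k + 1)]
      by_cases hall : ∀ z ∈ ys, z ≤ c
      · have hall' : ∀ z ∈ y :: ys, z ≤ c := by
          intro z hz
          rcases List.mem_cons.mp hz with h | h
          · exact h ▸ hyc
          · exact hall z h
        rw [if_pos hall, if_pos hall']
      · have hnot : ¬ ∀ z ∈ y :: ys, z ≤ c := by
          intro h; exact hall fun z hz => h z (List.mem_cons_of_mem _ hz)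
        have hcM : c < ys.foldl max c := by
          push Not at hall
          obtain ⟨z, hz, hzc⟩ := hall
          exact lt_of_lt_of_le hzc ((PySem.List.le_foldl_max ys c).2 z hz)
        have hne : y ≠ ys.foldl max c := ne_of_lt (lt_of_le_of_lt hyc hcM)
        have hmem : ys.foldl max c ∈ ys := by
          rcases PySem.List.foldl_max_mem ys c with h | h
          · exact absurd h (ne_of_lt hcM).symm
          · exact h
        rw [if_neg hall, if_neg hnot, hM, PySem.List.index?_cons_of_ne _ hne]
        obtain ⟨i, hi⟩ := Option.isSome_iff_exists.mp
          ((PySem.List.index?_isSome_iff ys _).mpr hmem)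
        rw [hi]
        simp only [Option.map_some, Option.getD_some, Prod.mk.injEq]
        refine ⟨by push_cast; ring, trivial⟩

theorem max_with_indice_spec : Claim_equal_max_with_indice := by
  intro l _ hpre
  unfold Spec_max_with_indice
  match l with
  | [] => exact absurd rfl hpre
  | x :: t =>
    have hA : max_with_indice (x :: t) = pvGo 0 x 1 t := by
      have hdef : max_with_indice (x :: t) =
          (PySem.List.pyRange ((1 : Nat) : Int) (((x :: t).length : Nat) : Int) 1).foldl
            (fun (s : Int × Int) i =>
              if s.2 < PySem.List.pyGetD (x :: t) i 0 then (i, PySem.List.pyGetD (x :: t) i 0)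
              else s)
            (0, x) := by norm_num [max_with_indice]
      rw [hdef, foldA_eq_pvGo t (x :: t) 1 0 x (by simp) (by simp)]
    have hB : max_with_indice_alt (x :: t) =
        (match PySem.List.index? (x :: t) (t.foldl max x) with
          | some i => ((i : Int), t.foldl max x)
          | none => (0, 0)) := by
      simp [max_with_indice_alt, PySem.List.max?_id_cons]
    rw [hA, hB, pvGo_spec t 0 x 1]
    by_cases hall : ∀ y ∈ t, y ≤ x
    · have hMx : t.foldl max x = x := by
        rcases PySem.List.foldl_max_mem t x with h | h
        · exact h
        · exact le_antisymm (hall _ h) (PySem.List.le_foldl_max t x).1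
      rw [if_pos hall, hMx, PySem.List.index?_cons_self]
      norm_num
    · have hxM : x < t.foldl max x := by
        push Not at hall
        obtain ⟨z, hz, hzx⟩ := hall
        exact lt_of_lt_of_le hzx ((PySem.List.le_foldl_max t x).2 z hz)
      have hne : x ≠ t.foldl max x := ne_of_lt hxM
      have hmem : t.foldl max x ∈ t := by
        rcases PySem.List.foldl_max_mem t x with h | h
        · exact absurd h hne.symm
        · exact h
      rw [if_neg hall, PySem.List.index?_cons_of_ne _ hne]
      obtain ⟨i, hi⟩ := Option.isSome_iff_exists.mp
        ((PySem.List.index?_isSome_iff t _).mpr hmem)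
      rw [hi]
      simp only [Option.map_some, Option.getD_some, Prod.mk.injEq]
      refine ⟨by push_cast; ring, trivial⟩
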